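-- pv_equiv track=rewrite | github.com/44ghost44/Extrasy-Cracker | python/hash_cracker.py | detect_algo
-- ===== SOURCE A (Python) =====
-- def detect_algo(hash_str):
--     h = hash_str.lower()
--     if h.startswith("$2a$") or h.startswith("$2b$") or h.startswith("$2y$"):
--         return "bcrypt"
--     elif h.startswith("$6$"):
--         return "crypt-sha512"
--     elif len(h) == 32 and all(c in "0123456789abcdef" for c in h):
--         return "md5/ntlm"
--     elif len(h) == 32 and all(c in "0123456789abcdef" for c in h.upper()):
--         return "ntlm"
--     elif len(h) == 40 and all(c in "0123456789abcdef" for c in h):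
--         return "sha1"
--     elif len(h) == 41 and h.startswith("*") and all(c in "0123456789abcdef" for c in h[1:]):
--         return "mysql-sha1"
--     elif len(h) == 64 and all(c in "0123456789abcdef" for c in h):
--         return "sha256"
--     elif len(h) == 96 and all(c in "0123456789abcdef" for c in h):
--         return "sha384"
--     elif len(h) == 128 and all(c in "0123456789abcdef" for c in h):
--         return "sha512"
--     elif len(h) == 16 and all(c in "0123456789abcdef" for c in h):
--         return "lm"
--     elif len(h) in (56, 112) and all(c in "0123456789abcdef" for c in h):
--         return "whirlpool"
--     elif len(h) == 64 and all(c in "0123456789abcdef" for c in h):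
--         return "sha3_256"
--     elif len(h) == 128 and all(c in "0123456789abcdef" for c in h):
--         return "sha3_512"
--     else:
--         return "unknown"
-- ===== SOURCE B (Python) =====
-- HEX = frozenset("0123456789abcdef")
-- NAMES = {16: "lm", 32: "md5/ntlm", 40: "sha1", 56: "whirlpool",
--          64: "sha256", 96: "sha384", 112: "whirlpool", 128: "sha512"}
--
-- def detect_algo(hash_str):
--     # one pass: accumulate length, the first four lowered chars, and two hex flags
--     n = 0
--     head = ""        # first up to 4 lowered characters
--     first_hex = True  # char 0 is a lowercase hex digit (vacuously true if empty)
--     tail_hex = True   # chars 1.. are lowercase hex digits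
--     for ch in hash_str:
--         c = ch.lower()
--         if n < 4:
--             head += c
--         if c not in HEX:
--             if n == 0:
--                 first_hex = False
--             else:
--                 tail_hex = False
--         n += 1
--     if head in ("$2a$", "$2b$", "$2y$"):
--         return "bcrypt"
--     if head.startswith("$6$"):
--         return "crypt-sha512"
--     if n == 41 and head.startswith("*") and tail_hex:
--         return "mysql-sha1"
--     if first_hex and tail_hex:
--         return NAMES.get(n, "unknown")
--     return "unknown"
-- ===== Notes on version B (the rewrite author's own statement) =====
-- stated objective: alternative
-- what changed: A's nine-branch elif chain, each branch re-checking length and re-scanning the whole string for hexness (plus unreachable ntlm/sha3 branches), is replaced by one left-to-right fold that accumulates length, the first four lowered characters and two hex flags in a single pass, followed by a constant-time dispatch on that accumulated state.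
import Mathlib
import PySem

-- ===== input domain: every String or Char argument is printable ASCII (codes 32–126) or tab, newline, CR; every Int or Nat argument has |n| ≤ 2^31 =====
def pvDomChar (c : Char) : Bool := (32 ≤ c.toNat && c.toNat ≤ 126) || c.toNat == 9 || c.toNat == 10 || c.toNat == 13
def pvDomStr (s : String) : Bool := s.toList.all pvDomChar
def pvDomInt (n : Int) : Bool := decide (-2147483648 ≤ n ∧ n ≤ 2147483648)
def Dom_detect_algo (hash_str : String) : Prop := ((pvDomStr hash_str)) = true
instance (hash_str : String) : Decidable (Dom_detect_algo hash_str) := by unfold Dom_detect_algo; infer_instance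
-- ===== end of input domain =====

-- B replaces A's elif chain, each branch re-scanning the whole string, by ONE left fold that
-- accumulates (length, first four lowered chars, two hex flags) and a final dispatch;
-- equivalence of RETURN values only.

-- 'c in "0123456789abcdef"' for a single character c (shared helper of both ports)
def hexChars : List Char :=
  ['0', '1', '2', '3', '4', '5', '6', '7', '8', '9', 'a', 'b', 'c', 'd', 'e', 'f']
def allHex (cs : List Char) : Bool := cs.all (fun c => hexChars.contains c)

-- ===== PORT A =====
-- A's elif chain on h = hash_str.lower(), branch for branch
def detectA (h : List Char) : String :=
  if PySem.Chars.startswith h ['$', '2', 'a', '$'] || PySem.Chars.startswith h ['$', '2', 'b', '$']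
      || PySem.Chars.startswith h ['$', '2', 'y', '$'] then "bcrypt"
  else if PySem.Chars.startswith h ['$', '6', '$'] then "crypt-sha512"
  else if h.length == 32 && allHex h then "md5/ntlm"
  else if h.length == 32 && allHex (PySem.Chars.upper h) then "ntlm"
  else if h.length == 40 && allHex h then "sha1"
  else if h.length == 41 && PySem.Chars.startswith h ['*']
      && allHex (PySem.List.slice h (some 1) none) then "mysql-sha1"
  else if h.length == 64 && allHex h then "sha256"
  else if h.length == 96 && allHex h then "sha384"
  else if h.length == 128 && allHex h then "sha512"
  else if h.length == 16 && allHex h then "lm"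
  else if (h.length == 56 || h.length == 112) && allHex h then "whirlpool"
  else if h.length == 64 && allHex h then "sha3_256"
  else if h.length == 128 && allHex h then "sha3_512"
  else "unknown"

def detect_algo (hash_str : String) : String :=
  detectA (PySem.Chars.lower hash_str.toList)

-- ===== PORT B =====
-- B's NAMES = {16:'lm', 32:'md5/ntlm', 40:'sha1', 56:'whirlpool', 64:'sha256', 96:'sha384', 112:'whirlpool', 128:'sha512'}
def lenMap : PySem.Dict Int String :=
  PySem.Dict.ofList [((16 : Int), "lm"), (32, "md5/ntlm"), (40, "sha1"), (56, "whirlpool"),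
    (64, "sha256"), (96, "sha384"), (112, "whirlpool"), (128, "sha512")]

-- B's loop body: state (n, head, first_hex, tail_hex), one character at a time
def foldStep (s : Nat × List Char × Bool × Bool) (ch : Char) : Nat × List Char × Bool × Bool :=
  let c := PySem.Chars.lowerChar ch
  let head' := if s.1 < 4 then s.2.1 ++ [c] else s.2.1
  let f' := if hexChars.contains c then s.2.2.1 else (if s.1 == 0 then false else s.2.2.1)
  let t' := if hexChars.contains c then s.2.2.2 else (if s.1 == 0 then s.2.2.2 else false)
  (s.1 + 1, head', f', t')

-- B's final dispatch on the accumulated state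
def classify (n : Nat) (head : List Char) (f t : Bool) : String :=
  if head == ['$', '2', 'a', '$'] || head == ['$', '2', 'b', '$'] || head == ['$', '2', 'y', '$']
    then "bcrypt"
  else if PySem.Chars.startswith head ['$', '6', '$'] then "crypt-sha512"
  else if n == 41 && PySem.Chars.startswith head ['*'] && t then "mysql-sha1"
  else if f && t then PySem.Dict.getD lenMap (n : Int) "unknown"
  else "unknown"

def detect_algo_alt (hash_str : String) : String :=
  match hash_str.toList.foldl foldStep (0, [], true, true) with
  | (n, head, f, t) => classify n head f t

-- ===== PRECONDITION & SPEC =====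
def Spec_detect_algo (hash_str : String) (out : String) : Prop := out = detect_algo_alt hash_str
instance (hash_str : String) (out : String) : Decidable (Spec_detect_algo hash_str out) := by unfold Spec_detect_algo; infer_instance

-- ===== CLAIM (what is proved, stated in full; the proofs are below) =====
def Claim_equal_detect_algo : Prop := ∀ (hash_str : String), Dom_detect_algo hash_str → Spec_detect_algo hash_str (detect_algo hash_str)

-- ===== LEMMAS AND PROOFS =====

-- 'first char is hex' flag that B's fold computes for a nonempty string
def headHex (cs : List Char) : Bool :=
  match cs with
  | [] => true
  | c :: _ => hexChars.contains c

-- B's fold, started at any n ≥ 1: counts, extends head to four chars, ANDs hexness into t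
theorem fold_pos (cs : List Char) (n : Nat) (hd : List Char) (f t : Bool) (hn : 1 ≤ n) :
    cs.foldl foldStep (n, hd, f, t) =
      (n + cs.length, hd ++ (PySem.Chars.lower cs).take (4 - n), f,
       t && allHex (PySem.Chars.lower cs)) := by
  induction cs generalizing n hd t with
  | nil => simp [PySem.Chars.lower, allHex]
  | cons c cs ih =>
    have hne : (n == 0) = false := by simp; omega
    have hstep : foldStep (n, hd, f, t) c =
        (n + 1, (if n < 4 then hd ++ [PySem.Chars.lowerChar c] else hd), f,
         t && hexChars.contains (PySem.Chars.lowerChar c)) := by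
      cases hc : hexChars.contains (PySem.Chars.lowerChar c) <;>
        simp [foldStep, hne, hc] <;> simp_all
    rw [List.foldl_cons, hstep, ih _ _ _ (by omega)]
    have e1 : PySem.Chars.lower (c :: cs) = PySem.Chars.lowerChar c :: PySem.Chars.lower cs := rfl
    have e2 : allHex (PySem.Chars.lowerChar c :: PySem.Chars.lower cs)
        = (hexChars.contains (PySem.Chars.lowerChar c) && allHex (PySem.Chars.lower cs)) := by
      simp [allHex]
    have elen : n + (c :: cs).length = (n + 1) + cs.length := by
      simp [List.length_cons]; omega
    rw [e1, e2, elen, ← Bool.and_assoc]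
    by_cases h4 : n < 4
    · rw [if_pos h4, show 4 - n = (4 - (n + 1)) + 1 from by omega, List.take_succ_cons,
        List.append_assoc, List.singleton_append]
    · rw [if_neg h4, show 4 - n = 0 from by omega, show 4 - (n + 1) = 0 from by omega]
      simp

-- B's fold from the initial state, characterized over L = lower(input)
theorem fold_init (cs : List Char) :
    cs.foldl foldStep (0, [], true, true) =
      ((PySem.Chars.lower cs).length, (PySem.Chars.lower cs).take 4,
       headHex (PySem.Chars.lower cs), allHex ((PySem.Chars.lower cs).tail)) := by
  cases cs with
  | nil => simp [PySem.Chars.lower, headHex, allHex]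
  | cons c cs =>
    have hstep : foldStep (0, [], true, true) c =
        (1, [PySem.Chars.lowerChar c], hexChars.contains (PySem.Chars.lowerChar c), true) := by
      cases hc : hexChars.contains (PySem.Chars.lowerChar c) <;>
        simp [foldStep, hc] <;> simp_all
    rw [List.foldl_cons, hstep, fold_pos _ 1 _ _ _ (le_refl 1)]
    simp only [foldStep, PySem.Chars.lower, List.map_cons, headHex, List.tail_cons,
      List.length_cons, List.take_succ_cons]
    cases hc : hexChars.contains (PySem.Chars.lowerChar c) <;>
      simp [hc, Nat.add_comm]

-- head.startswith(p) for head = L.take 4 and |p| ≤ 4 is L.startswith(p)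
theorem startswith_take (L p : List Char) (hp : p.length ≤ 4) :
    PySem.Chars.startswith (L.take 4) p = PySem.Chars.startswith L p := by
  rw [Bool.eq_iff_iff]
  simp only [PySem.Chars.startswith, List.isPrefixOf_iff_prefix, List.prefix_take_iff]
  exact ⟨fun h => h.1, fun h => ⟨h, hp⟩⟩

-- head == p for |p| = 4 is L.startswith(p)
theorem take_beq_eq_startswith (L p : List Char) (hp : p.length = 4) :
    (L.take 4 == p) = PySem.Chars.startswith L p := by
  rw [Bool.eq_iff_iff]
  simp only [PySem.Chars.startswith, beq_iff_eq, List.isPrefixOf_iff_prefix]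
  constructor
  · intro h; rw [← h]; exact List.take_prefix _ _
  · intro h; rw [List.prefix_iff_eq_take.mp h, hp]

-- all-hex splits into the two flags B maintains
theorem allHex_split (L : List Char) :
    allHex L = (headHex L && allHex L.tail) := by
  cases L with
  | nil => rfl
  | cons c t => simp [allHex, headHex]

-- a character whose uppercasing is a lowercase hex digit is itself one
theorem hex_of_upperChar (c : Char)
    (hc : hexChars.contains (PySem.Chars.upperChar c) = true) :
    hexChars.contains c = true := by
  unfold PySem.Chars.upperChar PySem.Chars.islower at hc
  by_cases hl : ('a' ≤ c && c ≤ 'z') = true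
  · exfalso
    rw [if_pos hl] at hc
    have hb : 97 ≤ c.toNat ∧ c.toNat ≤ 122 := by
      simp only [Bool.and_eq_true, decide_eq_true_eq] at hl
      exact ⟨Fin.mk_le_mk.mp hl.1, Fin.mk_le_mk.mp hl.2⟩
    have tm : (Char.ofNat (c.toNat - 32)).toNat = c.toNat - 32 := by
      unfold Char.ofNat
      rw [dif_pos (Or.inl (by omega))]
      rfl
    have hmem : Char.ofNat (c.toNat - 32) ∈ hexChars := List.mem_of_elem_eq_true hc
    have hrange : ∀ d ∈ hexChars, d.toNat ≤ 57 ∨ 97 ≤ d.toNat := by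
      intro d hd; fin_cases hd <;> decide
    have hd := hrange _ hmem
    rw [tm] at hd
    omega
  · rw [if_neg hl] at hc
    exact hc

theorem hex_of_upper (cs : List Char) (hc : allHex (PySem.Chars.upper cs) = true) :
    allHex cs = true := by
  simp only [allHex, PySem.Chars.upper, List.all_map, List.all_eq_true, Function.comp] at hc ⊢
  exact fun c hcmem => hex_of_upperChar c (hc c hcmem)

-- a string starting with '*' is not all-hex
theorem not_hex_of_star (h : List Char) (hs : PySem.Chars.startswith h ['*'] = true) :
    allHex h = false := by
  cases h with
  | nil => simp [PySem.Chars.startswith, List.isPrefixOf] at hs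
  | cons c t =>
    simp only [PySem.Chars.startswith, List.isPrefixOf, Bool.and_true, beq_iff_eq] at hs
    subst hs
    simp [allHex, hexChars]

-- the table lookup misses every length outside its eight keys
theorem lenMap_miss (n : Nat) (h16 : n ≠ 16) (h32 : n ≠ 32) (h40 : n ≠ 40) (h56 : n ≠ 56)
    (h64 : n ≠ 64) (h96 : n ≠ 96) (h112 : n ≠ 112) (h128 : n ≠ 128) :
    PySem.Dict.getD lenMap (n : Int) "unknown" = "unknown" := by
  have e16 : ((16 : Int) == (n : Int)) = false := by simp; omega
  have e32 : ((32 : Int) == (n : Int)) = false := by simp; omega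
  have e40 : ((40 : Int) == (n : Int)) = false := by simp; omega
  have e56 : ((56 : Int) == (n : Int)) = false := by simp; omega
  have e64 : ((64 : Int) == (n : Int)) = false := by simp; omega
  have e96 : ((96 : Int) == (n : Int)) = false := by simp; omega
  have e112 : ((112 : Int) == (n : Int)) = false := by simp; omega
  have e128 : ((128 : Int) == (n : Int)) = false := by simp; omega
  simp only [PySem.Dict.getD, PySem.Dict.get?]
  rw [show lenMap.items = [((16 : Int), "lm"), (32, "md5/ntlm"), (40, "sha1"), (56, "whirlpool"),
    (64, "sha256"), (96, "sha384"), (112, "whirlpool"), (128, "sha512")] from rfl]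
  simp [List.find?, e16, e32, e40, e56, e64, e96, e112, e128]

-- the core equivalence: A's chain on L equals B's dispatch on the fold's state
theorem detectA_eq_classify (L : List Char) :
    detectA L = classify L.length (L.take 4) (headHex L) (allHex L.tail) := by
  unfold detectA classify
  rw [take_beq_eq_startswith L _ (by decide), take_beq_eq_startswith L _ (by decide),
      take_beq_eq_startswith L _ (by decide),
      startswith_take L ['$', '6', '$'] (by decide),
      startswith_take L ['*'] (by decide)]
  by_cases b1 : (PySem.Chars.startswith L ['$', '2', 'a', '$'] || PySem.Chars.startswith L ['$', '2', 'b', '$']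
      || PySem.Chars.startswith L ['$', '2', 'y', '$']) = true
  · rw [if_pos b1, if_pos b1]
  · rw [if_neg b1, if_neg b1]
    by_cases b2 : PySem.Chars.startswith L ['$', '6', '$'] = true
    · rw [if_pos b2, if_pos b2]
    · rw [if_neg b2, if_neg b2]
      by_cases hst : PySem.Chars.startswith L ['*'] = true
      · -- starts with '*': L is not all-hex, so only the mysql branch can fire on either side
        have hx := not_hex_of_star L hst
        have hxu : allHex (PySem.Chars.upper L) = false := by
          cases hu : allHex (PySem.Chars.upper L) with
          | false => rfl
          | true => rw [hex_of_upper L hu] at hx; cases hx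
        have hsplit := allHex_split L
        rw [hx] at hsplit
        by_cases hh : headHex L = true
        · rw [hh] at hsplit
          simp only [Bool.true_and] at hsplit
          by_cases l41 : L.length = 41
          · have ht : allHex (PySem.List.slice L (some 1) none) = allHex L.tail := by
              rw [PySem.List.slice_from L (by omega)]
              simp [List.drop_one]
            simp [l41, hst, hx, hxu, ht, ← hsplit, hh]
          · simp [l41, hx, hxu, hh, ← hsplit]
        · -- head not hex and tail: f && t has f false
          simp only [Bool.not_eq_true] at hh
          by_cases l41 : L.length = 41
          · have ht : allHex (PySem.List.slice L (some 1) none) = allHex L.tail := by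
              rw [PySem.List.slice_from L (by omega)]
              simp [List.drop_one]
            simp [l41, hst, hx, hxu, ht, hh]
          · -- mysql dead on both sides; A's hex branches dead (hx); B's f false
            simp [l41, hx, hxu, hh]
      · -- no '*' prefix: the mysql branch is dead on both sides
        rw [Bool.not_eq_true] at hst
        rw [hst]
        have hsplit := (allHex_split L).symm
        by_cases hx : allHex L = true
        · -- all-hex: both flags true; A's chain agrees with B's table, length by length
          have hf : headHex L = true := by
            rw [allHex_split L] at hx; exact (Bool.and_eq_true _ _ |>.mp hx).1
          have ht : allHex L.tail = true := by
            rw [allHex_split L] at hx; exact (Bool.and_eq_true _ _ |>.mp hx).2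
          rw [hf, ht]
          by_cases l32 : L.length = 32
          · simp [l32, hx]; decide
          · by_cases l40 : L.length = 40
            · simp [l40, hx]; decide
            · by_cases l64 : L.length = 64
              · simp [l64, hx]; decide
              · by_cases l96 : L.length = 96
                · simp [l96, hx]; decide
                · by_cases l128 : L.length = 128
                  · simp [l128, hx]; decide
                  · by_cases l16 : L.length = 16
                    · simp [l16, hx]; decide
                    · by_cases l56 : L.length = 56
                      · simp [l56, hx]; decide
                      · by_cases l112 : L.length = 112
                        · simp [l112, hx]; decide
                        · rw [lenMap_miss L.length l16 l32 l40 l56 l64 l96 l112 l128]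
                          simp [l16, l32, l40, l56, l64, l96, l112, l128, hx]
        · -- not all-hex: every hex branch of A is dead, B's f && t is false
          simp only [Bool.not_eq_true] at hx
          have hxu : allHex (PySem.Chars.upper L) = false := by
            cases hu : allHex (PySem.Chars.upper L) with
            | false => rfl
            | true => rw [hex_of_upper L hu] at hx; cases hx
          have hft : (headHex L && allHex L.tail) = false := by rw [hsplit]; exact hx
          simp [hx, hxu, hft]

-- ===== VERDICT (by name: the statement is the Claim_ definition above) =====
theorem detect_algo_spec : Claim_equal_detect_algo := by
  intro s _
  unfold Spec_detect_algo detect_algo detect_algo_alt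
  rw [fold_init]
  exact detectA_eq_classify _
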